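-- pv_equiv track=rewrite | github.com/Tachma/watt-etw | watt_etw/market_import.py | _find_henex_price_row
-- ===== SOURCE A (Python) =====
-- from typing import Any
--
-- def _find_henex_price_row(rows: list[list[Any]]) -> int | None:
--     for index, row in enumerate(rows):
--         label = str(_cell(row, 0) or "").lower()
--         if "15min" in label and "mcp" in label:
--             return index
--     for index, row in enumerate(rows):
--         label = str(_cell(row, 0) or "").lower()
--         if "market clearing price" in label:
--             next_index = index + 1
--             if next_index < len(rows):
--                 return next_index
--     return None
--
-- def _cell(row: list[Any], index: int) -> Any:
--     return row[index] if index < len(row) else ""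
-- ===== SOURCE B (Python) =====
-- def _find_henex_price_row(rows):
--     n = len(rows)
--     first_15 = None
--     first_mcp = None
--     for index, row in enumerate(rows):
--         label = str(_cell(row, 0) or "").lower()
--         if "15min" in label and "mcp" in label:
--             first_15 = index
--             break
--         if first_mcp is None and "market clearing price" in label and index + 1 < n:
--             first_mcp = index + 1
--     return first_15 if first_15 is not None else first_mcp
--
-- def _cell(row, index):
--     return row[index] if index < len(row) else ""
-- ===== Notes on version B (the rewrite author's own statement) =====
-- stated objective: simpler
-- what changed: Replaces A's two full scans over rows by a single pass that tracks the 15min/mcp hit (breaking on it) and the first guarded 'market clearing price' successor index, combining the two at the end.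
import Mathlib
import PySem

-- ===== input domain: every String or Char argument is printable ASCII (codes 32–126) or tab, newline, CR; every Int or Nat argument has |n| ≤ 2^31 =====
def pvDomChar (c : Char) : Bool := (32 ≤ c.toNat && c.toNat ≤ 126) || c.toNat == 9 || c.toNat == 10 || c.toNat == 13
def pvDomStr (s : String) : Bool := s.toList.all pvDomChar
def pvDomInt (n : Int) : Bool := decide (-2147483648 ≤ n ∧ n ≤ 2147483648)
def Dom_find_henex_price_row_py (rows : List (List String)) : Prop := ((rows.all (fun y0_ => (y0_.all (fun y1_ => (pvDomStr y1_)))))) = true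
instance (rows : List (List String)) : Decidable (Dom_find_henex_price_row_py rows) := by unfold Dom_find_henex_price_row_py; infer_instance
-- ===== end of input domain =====

-- B does one pass with two accumulators instead of A's two sequential scans; same return value.

-- ===== PORT A =====
-- _cell(row, 0): row[0] if 0 < len(row) else ""
def pvCell0 (row : List String) : String :=
  if (0 : Int) < (row.length : Int) then (PySem.List.pyGet? row 0).getD "" else ""

-- str(_cell(row,0) or "").lower(); cells are strings so str() is identity and 'x or ""' keeps x unless it is "".
def pvLabel (row : List String) : String :=
  let c := pvCell0 row
  PySem.Str.lower (if c == "" then "" else c)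

-- first for-loop of A
def pvALoop1 : List (List String) → Int → Option Int
  | [], _ => none
  | row :: rest, i =>
    if PySem.Str.isIn "15min" (pvLabel row) && PySem.Str.isIn "mcp" (pvLabel row) then some i
    else pvALoop1 rest (i + 1)

-- second for-loop of A (n = len(rows))
def pvALoop2 (n : Int) : List (List String) → Int → Option Int
  | [], _ => none
  | row :: rest, i =>
    if PySem.Str.isIn "market clearing price" (pvLabel row) then
      if i + 1 < n then some (i + 1) else pvALoop2 n rest (i + 1)
    else pvALoop2 n rest (i + 1)

def find_henex_price_row_py (rows : List (List String)) : Option Int :=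
  match pvALoop1 rows 0 with
  | some i => some i
  | none => pvALoop2 (rows.length : Int) rows 0

-- ===== PORT B =====
-- single pass: breaks with (some index, fm) on a 15min/mcp hit, otherwise records the first
-- guarded 'market clearing price' successor index in fm
def pvBLoop (n : Int) : List (List String) → Int → Option Int → Option Int × Option Int
  | [], _, fm => (none, fm)
  | row :: rest, i, fm =>
    let label := pvLabel row
    if PySem.Str.isIn "15min" label && PySem.Str.isIn "mcp" label then (some i, fm)
    else if fm.isNone && PySem.Str.isIn "market clearing price" label && decide (i + 1 < n) then
      pvBLoop n rest (i + 1) (some (i + 1))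
    else pvBLoop n rest (i + 1) fm

def find_henex_price_row_py_alt (rows : List (List String)) : Option Int :=
  let n : Int := (rows.length : Int)
  match pvBLoop n rows 0 none with
  | (some v, _) => some v
  | (none, fm) => fm

-- ===== PRECONDITION & SPEC =====
def Spec_find_henex_price_row_py (rows : List (List String)) (out : Option Int) : Prop := out = find_henex_price_row_py_alt rows
instance (rows : List (List String)) (out : Option Int) : Decidable (Spec_find_henex_price_row_py rows out) := by unfold Spec_find_henex_price_row_py; infer_instance

-- ===== CLAIM (what is proved, stated in full; the proofs are below) =====
def Claim_equal_find_henex_price_row_py : Prop := ∀ (rows : List (List String)), Dom_find_henex_price_row_py rows → Spec_find_henex_price_row_py rows (find_henex_price_row_py rows)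

-- ===== LEMMAS AND PROOFS =====
def pvCombine (p : Option Int × Option Int) : Option Int :=
  match p with
  | (some v, _) => some v
  | (none, fm) => fm

lemma pvBLoop_key (rest : List (List String)) : ∀ (n i : Int) (fm : Option Int),
    pvCombine (pvBLoop n rest i fm)
      = match pvALoop1 rest i with
        | some j => some j
        | none =>
          match fm with
          | some v => some v
          | none => pvALoop2 n rest i := by
  induction rest with
  | nil =>
    intro n i fm
    cases fm <;> simp [pvBLoop, pvALoop1, pvALoop2, pvCombine]
  | cons row rest ih =>
    intro n i fm
    cases fm <;>
      simp only [pvBLoop, pvALoop1, pvALoop2, pvCombine, Option.isNone_none, Option.isNone_some,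
        Bool.true_and, Bool.false_and] <;>
      split_ifs <;> simp_all [pvCombine, ih]

-- ===== VERDICT (by name: the statement is the Claim_ definition above) =====
theorem find_henex_price_row_py_spec : Claim_equal_find_henex_price_row_py := by
  intro rows _
  unfold Spec_find_henex_price_row_py find_henex_price_row_py find_henex_price_row_py_alt
  show _ = pvCombine (pvBLoop ((rows.length : Int)) rows 0 none)
  rw [pvBLoop_key]
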